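-- pv_equiv track=rewrite | github.com/sad-engineer/portfolio_website | apps/portfolio/src/portfolio/routers/feedback.py | _is_monotonic_sequence
-- ===== SOURCE A (Python) =====
-- def _is_monotonic_sequence(digits: str) -> bool:
--     if len(digits) < 8:
--         return False
--     ascending = all(
--         (int(digits[index + 1]) - int(digits[index])) == 1
--         for index in range(len(digits) - 1)
--     )
--     if ascending:
--         return True
--     descending = all(
--         (int(digits[index]) - int(digits[index + 1])) == 1
--         for index in range(len(digits) - 1)
--     )
--     return descending
-- ===== SOURCE B (Python) =====
-- def _is_monotonic_sequence(digits: str) -> bool: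
--     if len(digits) < 8:
--         return False
--     nums = [int(c) for c in digits]
--     first = nums[0]
--     return (nums == list(range(first, first + len(nums)))
--             or nums == list(range(first, first - len(nums), -1)))
-- ===== Notes on version B (the rewrite author's own statement) =====
-- stated objective: simpler
-- what changed: Instead of two index-based scans of adjacent differences, B converts the string to an int list once and compares it for equality with the expected ascending or descending range built from its first element.
-- outside the precondition, e.g. on _is_monotonic_sequence('11abcdef'): A returns False, B raises ValueError
import Mathlib
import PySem

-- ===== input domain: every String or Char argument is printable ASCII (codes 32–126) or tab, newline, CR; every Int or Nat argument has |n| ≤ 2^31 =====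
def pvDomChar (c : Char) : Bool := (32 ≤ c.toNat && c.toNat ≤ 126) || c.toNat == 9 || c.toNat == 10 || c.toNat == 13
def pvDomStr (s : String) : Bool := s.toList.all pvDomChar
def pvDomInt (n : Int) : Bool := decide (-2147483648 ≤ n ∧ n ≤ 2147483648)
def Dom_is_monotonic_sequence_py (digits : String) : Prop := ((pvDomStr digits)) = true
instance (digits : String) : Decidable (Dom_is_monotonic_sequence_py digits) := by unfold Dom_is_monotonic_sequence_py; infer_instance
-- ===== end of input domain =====

-- B replaces A's two pairwise-difference index scans by building the int list once and
-- comparing it with the expected ascending/descending range; objective: simpler.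

-- ===== PORT A =====
-- int(digits[index]) made total: the .getD 0 defaults are never reached inside Pre_
-- (index in range, all characters digits).
def pvDigitVal (oc : Option Char) : Int :=
  (oc.bind (fun c => PySem.Int.ofChars? [c])).getD 0

def is_monotonic_sequence_py (digits : String) : Bool :=
  if PySem.Str.len digits < 8 then false
  else
    let ascending := (PySem.List.pyRange 0 (PySem.Str.len digits - 1) 1).all
      (fun index =>
        pvDigitVal (PySem.Str.pyGet? digits (index + 1)) -
          pvDigitVal (PySem.Str.pyGet? digits index) == 1)
    if ascending then true
    else
      (PySem.List.pyRange 0 (PySem.Str.len digits - 1) 1).all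
        (fun index =>
          pvDigitVal (PySem.Str.pyGet? digits index) -
            pvDigitVal (PySem.Str.pyGet? digits (index + 1)) == 1)

-- ===== PORT B =====
def is_monotonic_sequence_py_alt (digits : String) : Bool :=
  if PySem.Str.len digits < 8 then false
  else
    let nums := digits.toList.map (fun c => (PySem.Int.ofChars? [c]).getD 0)
    let first := (PySem.List.pyGet? nums 0).getD 0
    nums == PySem.List.pyRange first (first + nums.length) 1
      || nums == PySem.List.pyRange first (first - nums.length) (-1)

-- ===== PRECONDITION & SPEC =====
-- Pre_ excludes strings of length ≥ 8 containing a non-digit character: there Python A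
-- either raises ValueError or (when both scans stop at an earlier mismatching pair)
-- returns False only by short-circuit accident, while B, which parses every character
-- up front, itself raises ValueError on all of them.
def Pre_is_monotonic_sequence_py (digits : String) : Prop :=
  digits.toList.length < 8 ∨ digits.toList.all (fun c => c.isDigit) = true
instance (digits : String) : Decidable (Pre_is_monotonic_sequence_py digits) := by
  unfold Pre_is_monotonic_sequence_py; infer_instance
def pvWitness_is_monotonic_sequence_py : String := "23456789"

def Spec_is_monotonic_sequence_py (digits : String) (out : Bool) : Prop := out = is_monotonic_sequence_py_alt digits
instance (digits : String) (out : Bool) : Decidable (Spec_is_monotonic_sequence_py digits out) := by unfold Spec_is_monotonic_sequence_py; infer_instance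

-- ===== CLAIM (what is proved, stated in full; the proofs are below) =====
def Claim_equal_is_monotonic_sequence_py : Prop := ∀ (digits : String), Dom_is_monotonic_sequence_py digits → Pre_is_monotonic_sequence_py digits → Spec_is_monotonic_sequence_py digits (is_monotonic_sequence_py digits)

-- ===== LEMMAS AND PROOFS =====

theorem pvRange_congr (a b a' b' s : Int) (ha : a = a') (hb : b = b') :
    PySem.List.pyRange a b s = PySem.List.pyRange a' b' s := by rw [ha, hb]

-- A list starting at x equals range(x, x + len, 1) iff every adjacent difference is 1.
theorem pv_cons_eq_range_asc : ∀ (l : List Int) (x : Int),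
    (x :: l = PySem.List.pyRange x (x + (1 + (l.length : Int))) 1) ↔
    (∀ k : Nat, (h : k + 1 < (x :: l).length) →
      (x :: l)[k + 1] - (x :: l)[k]'(by omega) = 1) := by
  intro l
  induction l with
  | nil =>
    intro x
    constructor
    · intro _ k h; simp at h
    · intro _
      rw [pvRange_congr _ _ x (x + 1) 1 rfl (by simp), PySem.List.pyRange_one_singleton]
  | cons y t ih =>
    intro x
    have hcons : PySem.List.pyRange x (x + (1 + ((y :: t).length : Int))) 1 =
        x :: PySem.List.pyRange (x + 1) (x + (1 + ((y :: t).length : Int))) 1 := by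
      apply PySem.List.pyRange_one_cons
      simp only [List.length_cons]; push_cast; omega
    have hmid : PySem.List.pyRange (x + 1) (x + (1 + ((y :: t).length : Int))) 1 =
        PySem.List.pyRange (x + 1) ((x + 1) + (1 + (t.length : Int))) 1 := by
      apply pvRange_congr _ _ _ _ _ rfl
      simp only [List.length_cons]; push_cast; ring
    constructor
    · intro heq k h
      rw [hcons, hmid] at heq
      injection heq with _ htail
      have hy : y = x + 1 := by
        rw [PySem.List.pyRange_one_cons (by push_cast; omega)] at htail
        injection htail with hy _
      have hrange : y :: t = PySem.List.pyRange y (y + (1 + (t.length : Int))) 1 := by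
        rw [htail]; exact pvRange_congr _ _ _ _ _ hy.symm (by omega)
      have hrec := (ih y).mp hrange
      match k with
      | 0 => simp; omega
      | Nat.succ k =>
        have hk : k + 1 < (y :: t).length := by simpa using h
        simpa using hrec k hk
    · intro hall
      have hy : y = x + 1 := by
        have h0 := hall 0 (by simp)
        simp at h0
        omega
      have htail : y :: t = PySem.List.pyRange y (y + (1 + (t.length : Int))) 1 := by
        apply (ih y).mpr
        intro k h
        have hk : k + 1 + 1 < (x :: y :: t).length := by simpa using h
        simpa using hall (k + 1) hk
      rw [hcons, hmid,
        pvRange_congr (x + 1) ((x + 1) + (1 + (t.length : Int))) y (y + (1 + (t.length : Int))) 1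
          hy.symm (by omega), ← htail]

-- A list starting at x equals range(x, x - len, -1) iff every adjacent difference is -1.
theorem pv_cons_eq_range_desc : ∀ (l : List Int) (x : Int),
    (x :: l = PySem.List.pyRange x (x - (1 + (l.length : Int))) (-1)) ↔
    (∀ k : Nat, (h : k + 1 < (x :: l).length) →
      (x :: l)[k]'(by omega) - (x :: l)[k + 1] = 1) := by
  intro l
  induction l with
  | nil =>
    intro x
    constructor
    · intro _ k h; simp at h
    · intro _
      rw [pvRange_congr _ _ x (x - 1) (-1) rfl (by simp)]
      rw [PySem.List.pyRange_neg_one_cons (by omega)]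
      rw [PySem.List.pyRange_neg_one_eq_nil (by omega)]
  | cons y t ih =>
    intro x
    have hcons : PySem.List.pyRange x (x - (1 + ((y :: t).length : Int))) (-1) =
        x :: PySem.List.pyRange (x - 1) (x - (1 + ((y :: t).length : Int))) (-1) := by
      apply PySem.List.pyRange_neg_one_cons
      simp only [List.length_cons]; push_cast; omega
    have hmid : PySem.List.pyRange (x - 1) (x - (1 + ((y :: t).length : Int))) (-1) =
        PySem.List.pyRange (x - 1) ((x - 1) - (1 + (t.length : Int))) (-1) := by
      apply pvRange_congr _ _ _ _ _ rfl
      simp only [List.length_cons]; push_cast; ring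
    constructor
    · intro heq k h
      rw [hcons, hmid] at heq
      injection heq with _ htail
      have hy : y = x - 1 := by
        rw [PySem.List.pyRange_neg_one_cons (by push_cast; omega)] at htail
        injection htail with hy _
      have hrange : y :: t = PySem.List.pyRange y (y - (1 + (t.length : Int))) (-1) := by
        rw [htail]; exact pvRange_congr _ _ _ _ _ hy.symm (by omega)
      have hrec := (ih y).mp hrange
      match k with
      | 0 => simp; omega
      | Nat.succ k =>
        have hk : k + 1 < (y :: t).length := by simpa using h
        simpa using hrec k hk
    · intro hall
      have hy : y = x - 1 := by
        have h0 := hall 0 (by simp)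
        simp at h0
        omega
      have htail : y :: t = PySem.List.pyRange y (y - (1 + (t.length : Int))) (-1) := by
        apply (ih y).mpr
        intro k h
        have hk : k + 1 + 1 < (x :: y :: t).length := by simpa using h
        simpa using hall (k + 1) hk
      rw [hcons, hmid,
        pvRange_congr (x - 1) ((x - 1) - (1 + (t.length : Int))) y (y - (1 + (t.length : Int))) (-1)
          hy.symm (by omega), ← htail]

-- A's index scan (over range(len-1)) expressed as a Nat-indexed pairwise condition on nums.
theorem pv_scan_eq (cs : List Char) (f : Int → Int → Int) :
    ((PySem.List.pyRange 0 ((cs.length : Int) - 1) 1).all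
      (fun index =>
        f (pvDigitVal (PySem.List.pyGet? cs (index + 1)))
          (pvDigitVal (PySem.List.pyGet? cs index)) == 1)) = true ↔
    (∀ k : Nat, (h : k + 1 < cs.length) →
      f ((cs.map (fun c => (PySem.Int.ofChars? [c]).getD 0))[k + 1]'(by simpa using h))
        ((cs.map (fun c => (PySem.Int.ofChars? [c]).getD 0))[k]'(by simp; omega)) = 1) := by
  rw [List.all_eq_true]
  constructor
  · intro hall k h
    have hm : (k : Int) ∈ PySem.List.pyRange 0 ((cs.length : Int) - 1) 1 := by
      rw [PySem.List.mem_pyRange_one]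
      constructor
      · positivity
      · omega
    have := hall _ hm
    have h1 : PySem.List.pyGet? cs ((k : Int) + 1) = some (cs[k + 1]'h) := by
      rw [show ((k : Int) + 1) = ((k + 1 : Nat) : Int) by push_cast; ring,
        PySem.List.pyGet?_natCast]
      simp [List.getElem?_eq_getElem h]
    have h2 : PySem.List.pyGet? cs (k : Int) = some (cs[k]'(by omega)) := by
      rw [PySem.List.pyGet?_natCast]
      simp [List.getElem?_eq_getElem (show k < cs.length by omega)]
    rw [h1, h2] at this
    simp only [beq_iff_eq] at this
    simpa [pvDigitVal] using this
  · intro hall i hi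
    rw [PySem.List.mem_pyRange_one] at hi
    obtain ⟨hi0, hi1⟩ := hi
    obtain ⟨k, rfl⟩ : ∃ k : Nat, i = (k : Int) := ⟨i.toNat, by omega⟩
    have h : k + 1 < cs.length := by omega
    have := hall k h
    have h1 : PySem.List.pyGet? cs ((k : Int) + 1) = some (cs[k + 1]'h) := by
      rw [show ((k : Int) + 1) = ((k + 1 : Nat) : Int) by push_cast; ring,
        PySem.List.pyGet?_natCast]
      simp [List.getElem?_eq_getElem h]
    have h2 : PySem.List.pyGet? cs ((k : Int)) = some (cs[k]'(by omega)) := by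
      rw [PySem.List.pyGet?_natCast]
      simp [List.getElem?_eq_getElem (show k < cs.length by omega)]
    rw [h1, h2]
    simp only [beq_iff_eq]
    simpa [pvDigitVal] using this

-- ===== VERDICT (by name: the statement is the Claim_ definition above) =====
theorem is_monotonic_sequence_py_spec : Claim_equal_is_monotonic_sequence_py := by
  intro digits _ _
  unfold Spec_is_monotonic_sequence_py is_monotonic_sequence_py is_monotonic_sequence_py_alt
  by_cases hlen : PySem.Str.len digits < 8
  · rw [if_pos hlen, if_pos hlen]
  · simp only [hlen, if_neg, if_false]
    have hlen' : 8 ≤ digits.toList.length := by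
      simp only [PySem.Str.len_eq, PySem.Chars.len] at hlen
      omega
    obtain ⟨c, cs', hcons⟩ : ∃ c cs', digits.toList = c :: cs' := by
      cases h : digits.toList with
      | nil => rw [h] at hlen'; simp at hlen'
      | cons a l => exact ⟨a, l, rfl⟩
    set d : Char → Int := fun c => (PySem.Int.ofChars? [c]).getD 0 with hd
    set nums := digits.toList.map d with hnums
    have hnumscons : nums = d c :: cs'.map d := by rw [hnums, hcons]; rfl
    have hfirst : (PySem.List.pyGet? nums 0).getD 0 = d c := by
      rw [hnumscons, PySem.List.pyGet?_zero_cons]; rfl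
    have hlen2 : (nums.length : Int) = (digits.toList.length : Int) := by
      simp [hnums]
    have hstr : ∀ i : Int, PySem.Str.pyGet? digits i = PySem.List.pyGet? digits.toList i := by
      intro i; simp [PySem.Str.pyGet?]
    -- ascending scan ↔ nums = ascending range
    have hasc :
        ((PySem.List.pyRange 0 (PySem.Str.len digits - 1) 1).all
          (fun index =>
            pvDigitVal (PySem.Str.pyGet? digits (index + 1)) -
              pvDigitVal (PySem.Str.pyGet? digits index) == 1)) =
        (nums == PySem.List.pyRange ((PySem.List.pyGet? nums 0).getD 0)
          (((PySem.List.pyGet? nums 0).getD 0) + nums.length) 1) := by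
      rw [Bool.eq_iff_iff, beq_iff_eq]
      have hA := pv_scan_eq digits.toList (fun a b => a - b)
      simp only [hstr, PySem.Str.len_eq, PySem.Chars.len]
      rw [hA]
      have hB := pv_cons_eq_range_asc (cs'.map d) (d c)
      rw [hfirst, hnumscons]
      have hend : d c + ((d c :: cs'.map d).length : Int)
          = d c + (1 + ((cs'.map d).length : Int)) := by
        simp only [List.length_cons]; push_cast; ring
      rw [hend, hB]
      constructor
      · intro hall k h
        have h' : k + 1 < digits.toList.length := by
          rw [hcons]; simpa using h
        have := hall k h'
        simp only [hnums, hcons] at this ⊢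
        exact this
      · intro hall k h
        have h' : k + 1 < (d c :: cs'.map d).length := by
          rw [hcons] at h; simpa using h
        have := hall k h'
        simp only [hnums, hcons] at this ⊢
        exact this
    have hdesc :
        ((PySem.List.pyRange 0 (PySem.Str.len digits - 1) 1).all
          (fun index =>
            pvDigitVal (PySem.Str.pyGet? digits index) -
              pvDigitVal (PySem.Str.pyGet? digits (index + 1)) == 1)) =
        (nums == PySem.List.pyRange ((PySem.List.pyGet? nums 0).getD 0)
          (((PySem.List.pyGet? nums 0).getD 0) - nums.length) (-1)) := by
      rw [Bool.eq_iff_iff, beq_iff_eq]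
      have hA := pv_scan_eq digits.toList (fun a b => b - a)
      simp only [hstr, PySem.Str.len_eq, PySem.Chars.len]
      rw [hA]
      have hB := pv_cons_eq_range_desc (cs'.map d) (d c)
      rw [hfirst, hnumscons]
      have hend : d c - ((d c :: cs'.map d).length : Int)
          = d c - (1 + ((cs'.map d).length : Int)) := by
        simp only [List.length_cons]; push_cast; ring
      rw [hend, hB]
      constructor
      · intro hall k h
        have h' : k + 1 < digits.toList.length := by
          rw [hcons]; simpa using h
        have := hall k h'
        simp only [hnums, hcons] at this ⊢
        exact this
      · intro hall k h
        have h' : k + 1 < (d c :: cs'.map d).length := by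
          rw [hcons] at h; simpa using h
        have := hall k h'
        simp only [hnums, hcons] at this ⊢
        exact this
    simp only [hasc, hdesc]
    cases h1 : (nums == PySem.List.pyRange ((PySem.List.pyGet? nums 0).getD 0)
        (((PySem.List.pyGet? nums 0).getD 0) + nums.length) 1) <;> simp [h1]
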